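-- pv_equiv track=rewrite | github.com/Abheelash-Mishra/Competitive-Programming-Repo | Implementation/33_Game 23.py | solve
-- ===== SOURCE A (Python) =====
-- def solve(x, y):
--     if x == y:
--         return 0
--
--     if y % x != 0 or (y % 2 != 0 and y % 3 != 0):
--         return -1
--
--     factor = y // x
--     moves = 0
--
--     while factor % 2 == 0 or factor % 3 == 0:
--         if factor % 2 == 0:
--             factor = factor // 2
--             moves += 1
--
--         if factor % 3 == 0:
--             factor = factor // 3
--             moves += 1
--
--     if factor != 1:
--         return -1
--
--     return moves
-- ===== SOURCE B (Python) =====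
-- def solve(x, y):
--     if x == y:
--         return 0
--     if y % x != 0:
--         return -1
--     factor = y // x
--     # factor must be a product 2**a * 3**b; search the (bounded) exponent grid
--     # directly instead of repeatedly dividing: |factor| <= 2**31, so a < 64, b < 41 suffice.
--     p2 = 1
--     for a in range(64):
--         p3 = p2
--         for b in range(41):
--             if p3 == factor:
--                 return a + b
--             p3 *= 3
--         p2 *= 2
--     return -1
-- ===== Notes on version B (the rewrite author's own statement) =====
-- stated objective: alternative
-- what changed: Instead of repeatedly dividing the quotient by 2 and 3 in a loop, B enumerates the bounded exponent grid (a,b) and returns a+b for the unique pair with 2**a * 3**b == y//x, else -1; the redundant y%2/y%3 guard disappears.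
import Mathlib
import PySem

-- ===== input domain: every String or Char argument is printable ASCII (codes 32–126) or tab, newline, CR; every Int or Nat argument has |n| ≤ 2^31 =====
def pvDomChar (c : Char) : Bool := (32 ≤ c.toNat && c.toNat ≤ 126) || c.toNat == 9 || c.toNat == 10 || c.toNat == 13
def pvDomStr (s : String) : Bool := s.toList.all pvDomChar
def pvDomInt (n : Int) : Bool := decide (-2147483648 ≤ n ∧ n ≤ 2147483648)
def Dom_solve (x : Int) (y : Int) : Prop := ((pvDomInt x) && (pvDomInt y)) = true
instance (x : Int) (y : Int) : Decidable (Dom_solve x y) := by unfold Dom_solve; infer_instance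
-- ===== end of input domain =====

-- B replaces A's repeated-division loop by a direct search of the bounded exponent
-- grid: it returns a+b for the (unique) pair with 2^a * 3^b = y // x, else -1
-- (objective: alternative algorithm; A's loop is ported with a fuel totality guard only;
-- Python's A loops forever when y = 0 ≠ x, excluded by Pre_solve).

-- ===== PORT A =====
-- A's while loop: each iteration divides factor by 2 and/or by 3 exactly as A's body does.
def solveLoopF : Nat → Int → Int → Int
  | 0, _, _ => -1
  | fuel + 1, factor, moves =>
    if PySem.Int.mod factor 2 = 0 then
      if PySem.Int.mod (PySem.Int.floordiv factor 2) 3 = 0 then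
        solveLoopF fuel (PySem.Int.floordiv (PySem.Int.floordiv factor 2) 3) (moves + 2)
      else
        solveLoopF fuel (PySem.Int.floordiv factor 2) (moves + 1)
    else if PySem.Int.mod factor 3 = 0 then
      solveLoopF fuel (PySem.Int.floordiv factor 3) (moves + 1)
    else if factor ≠ 1 then -1 else moves

def solve (x : Int) (y : Int) : Int :=
  if x = y then 0
  else if PySem.Int.mod y x ≠ 0 ∨ (PySem.Int.mod y 2 ≠ 0 ∧ PySem.Int.mod y 3 ≠ 0) then -1
  else solveLoopF ((PySem.Int.floordiv y x).natAbs + 1) (PySem.Int.floordiv y x) 0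

-- ===== PORT B =====
-- inner 'for b in range(41)' with early return: carries p3
def bLoop3 (factor : Int) (a : Int) : List Int → Int → Option Int
  | [], _ => none
  | b :: bs, p3 => if p3 = factor then some (a + b) else bLoop3 factor a bs (p3 * 3)

-- outer 'for a in range(64)': carries p2
def bLoop2 (factor : Int) : List Int → Int → Option Int
  | [], _ => none
  | a :: as_, p2 =>
    match bLoop3 factor a (PySem.List.pyRange 0 41 1) p2 with
    | some r => some r
    | none => bLoop2 factor as_ (p2 * 2)

def solve_alt (x : Int) (y : Int) : Int :=
  if x = y then 0
  else if PySem.Int.mod y x ≠ 0 then -1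
  else
    match bLoop2 (PySem.Int.floordiv y x) (PySem.List.pyRange 0 64 1) 1 with
    | some r => r
    | none => -1

-- ===== PRECONDITION & SPEC =====
-- Pre_ excludes only inputs on which A does not return: x = 0 ≠ y raises ZeroDivisionError,
-- and y = 0 ≠ x makes A's while loop run forever (factor = 0).
def Pre_solve (x : Int) (y : Int) : Prop := x = y ∨ (x ≠ 0 ∧ y ≠ 0)
instance (x : Int) (y : Int) : Decidable (Pre_solve x y) := by unfold Pre_solve; infer_instance
def pvWitness_solve : Int × Int := (1, 6)

def Spec_solve (x : Int) (y : Int) (out : Int) : Prop := out = solve_alt x y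
instance (x : Int) (y : Int) (out : Int) : Decidable (Spec_solve x y out) := by unfold Spec_solve; infer_instance

-- ===== CLAIM =====
def Claim_equal_solve : Prop := ∀ (x : Int) (y : Int), Dom_solve x y → Pre_solve x y → Spec_solve x y (solve x y)

-- ===== LEMMAS AND PROOFS =====

lemma pmod2 (a : Int) : PySem.Int.mod a 2 = a % 2 := PySem.Int.mod_eq_emod_of_pos (by norm_num)
lemma pmod3 (a : Int) : PySem.Int.mod a 3 = a % 3 := PySem.Int.mod_eq_emod_of_pos (by norm_num)
lemma pdiv2 (a : Int) : PySem.Int.floordiv a 2 = a / 2 := PySem.Int.floordiv_eq_ediv_of_pos (by norm_num)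
lemma pdiv3 (a : Int) : PySem.Int.floordiv a 3 = a / 3 := PySem.Int.floordiv_eq_ediv_of_pos (by norm_num)

lemma solveLoopF_succ (fuel : Nat) (f m : Int) :
    solveLoopF (fuel + 1) f m =
      if f % 2 = 0 then
        (if (f / 2) % 3 = 0 then solveLoopF fuel (f / 2 / 3) (m + 2)
         else solveLoopF fuel (f / 2) (m + 1))
      else if f % 3 = 0 then solveLoopF fuel (f / 3) (m + 1)
      else if f ≠ 1 then -1 else m := by
  simp only [solveLoopF, pmod2, pmod3, pdiv2, pdiv3]

lemma three_not_dvd_two_pow (k : Nat) : ¬ (3:Int) ∣ 2^k := by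
  intro h
  have := Int.prime_three.dvd_of_dvd_pow h
  omega

lemma two_not_dvd_three_pow (k : Nat) : ¬ (2:Int) ∣ 3^k := by
  intro h
  have := Int.prime_two.dvd_of_dvd_pow h
  omega

lemma pow23_pos (a b : Nat) : (1:Int) ≤ 2^a * 3^b := by
  have h : (1:Nat) ≤ 2^a * 3^b := Nat.one_le_iff_ne_zero.mpr (by positivity)
  exact_mod_cast h

-- unique factorization into 2^a * 3^b over Int
lemma pow23_inj : ∀ (a : Nat) (b A B : Nat), (2^a * 3^b : Int) = 2^A * 3^B → a = A ∧ b = B := by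
  intro a
  induction a with
  | zero =>
    intro b A B h
    cases A with
    | zero =>
      simp only [pow_zero, one_mul] at h
      have hb : ((3:Int))^b = ((3^b : Nat) : Int) := by push_cast; ring
      have hB : ((3:Int))^B = ((3^B : Nat) : Int) := by push_cast; ring
      rw [hb, hB] at h
      have : (3:Nat)^b = 3^B := by exact_mod_cast h
      exact ⟨rfl, Nat.pow_right_injective (by norm_num) this⟩
    | succ A' =>
      exfalso
      apply two_not_dvd_three_pow b
      simp only [pow_zero, one_mul] at h
      rw [h, pow_succ]
      exact ⟨2^A' * 3^B, by ring⟩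
  | succ a' ih =>
    intro b A B h
    cases A with
    | zero =>
      exfalso
      apply two_not_dvd_three_pow B
      simp only [pow_zero, one_mul] at h
      rw [← h, pow_succ]
      exact ⟨2^a' * 3^b, by ring⟩
    | succ A' =>
      have h2 : (2:Int) * (2^a' * 3^b) = 2 * (2^A' * 3^B) := by
        rw [pow_succ] at h; linear_combination h
      have := ih b A' B (mul_left_cancel₀ (by norm_num) h2)
      omega

-- A's loop on a product 2^a * 3^b returns m + a + b
lemma A_good : ∀ (fuel : Nat) (a b : Nat) (m : Int), ((2^a * 3^b : Int)).natAbs < fuel →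
    solveLoopF fuel (2^a * 3^b) m = m + a + b := by
  intro fuel
  induction fuel with
  | zero => intro a b m h; omega
  | succ n ih =>
    intro a b m h
    have hpos := pow23_pos a b
    rw [solveLoopF_succ]
    cases a with
    | succ a' =>
      have hf2 : (2^(a'+1) * 3^b : Int) = 2 * (2^a' * 3^b) := by ring
      have hmod : (2^(a'+1) * 3^b : Int) % 2 = 0 := by rw [hf2]; omega
      have hdiv : (2^(a'+1) * 3^b : Int) / 2 = 2^a' * 3^b := by
        rw [hf2]; exact Int.mul_ediv_cancel_left _ (by norm_num)
      rw [if_pos hmod, hdiv]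
      have hpos' := pow23_pos a' b
      cases b with
      | succ b' =>
        have hf3 : (2^a' * 3^(b'+1) : Int) = 3 * (2^a' * 3^b') := by ring
        have hmod3 : (2^a' * 3^(b'+1) : Int) % 3 = 0 := by rw [hf3]; omega
        have hdiv3 : (2^a' * 3^(b'+1) : Int) / 3 = 2^a' * 3^b' := by
          rw [hf3]; exact Int.mul_ediv_cancel_left _ (by norm_num)
        rw [if_pos hmod3, hdiv3, ih a' b' (m + 2) (by
          have := pow23_pos a' b'
          have h6 : (2^(a'+1) * 3^(b'+1) : Int) = 6 * (2^a' * 3^b') := by ring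
          omega)]
        push_cast; ring
      | zero =>
        have hmod3 : ¬ (2^a' * 3^0 : Int) % 3 = 0 := by
          intro hc
          exact three_not_dvd_two_pow a' (by simpa using (Int.dvd_of_emod_eq_zero hc))
        rw [if_neg hmod3, ih a' 0 (m + 1) (by
          have h2 : (2^(a'+1) * 3^0 : Int) = 2 * (2^a' * 3^0) := by ring
          omega)]
        push_cast; ring
    | zero =>
      have hmod2 : ¬ (2^0 * 3^b : Int) % 2 = 0 := by
        intro hc
        exact two_not_dvd_three_pow b (by simpa using (Int.dvd_of_emod_eq_zero hc))
      rw [if_neg hmod2]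
      cases b with
      | succ b' =>
        have hf3 : (2^0 * 3^(b'+1) : Int) = 3 * (2^0 * 3^b') := by ring
        have hmod3 : (2^0 * 3^(b'+1) : Int) % 3 = 0 := by rw [hf3]; omega
        have hdiv3 : (2^0 * 3^(b'+1) : Int) / 3 = 2^0 * 3^b' := by
          rw [hf3]; exact Int.mul_ediv_cancel_left _ (by norm_num)
        rw [if_pos hmod3, hdiv3, ih 0 b' (m + 1) (by
          have := pow23_pos 0 b'
          omega)]
        push_cast; ring
      | zero =>
        norm_num

-- A's loop on a factor that is not a product 2^a * 3^b returns -1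
lemma A_bad : ∀ (fuel : Nat) (f m : Int), f ≠ 0 → f.natAbs < fuel →
    (∀ a b : Nat, f ≠ 2^a * 3^b) → solveLoopF fuel f m = -1 := by
  intro fuel
  induction fuel with
  | zero => intro f m _ h _; omega
  | succ n ih =>
    intro f m hf h hng
    rw [solveLoopF_succ]
    by_cases h2 : f % 2 = 0
    · rw [if_pos h2]
      by_cases h3 : (f / 2) % 3 = 0
      · rw [if_pos h3]
        refine ih (f / 2 / 3) (m + 2) (by omega) (by omega) ?_
        intro a b hc
        apply hng (a + 1) (b + 1)
        have : f = 6 * (f / 2 / 3) := by omega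
        rw [this, hc]; ring
      · rw [if_neg h3]
        refine ih (f / 2) (m + 1) (by omega) (by omega) ?_
        intro a b hc
        apply hng (a + 1) b
        have : f = 2 * (f / 2) := by omega
        rw [this, hc]; ring
    · rw [if_neg h2]
      by_cases h3 : f % 3 = 0
      · rw [if_pos h3]
        refine ih (f / 3) (m + 1) (by omega) (by omega) ?_
        intro a b hc
        apply hng a (b + 1)
        have : f = 3 * (f / 3) := by omega
        rw [this, hc]; ring
      · rw [if_neg h3]
        have h1 : f ≠ 1 := by
          intro hc
          exact hng 0 0 (by rw [hc]; norm_num)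
        rw [if_pos h1]

-- B's inner loop finds nothing
lemma bLoop3_none : ∀ (n : Nat) (s t : Int), t - s ≤ n → ∀ (factor a p3 : Int),
    (∀ j : Nat, (j : Int) < t - s → p3 * 3^j ≠ factor) →
    bLoop3 factor a (PySem.List.pyRange s t 1) p3 = none := by
  intro n
  induction n with
  | zero =>
    intro s t ht factor a p3 _
    rw [PySem.List.pyRange_one_eq_nil (by omega)]
    rfl
  | succ k ih =>
    intro s t ht factor a p3 hno
    by_cases hst : t ≤ s
    · rw [PySem.List.pyRange_one_eq_nil hst]; rfl
    · rw [PySem.List.pyRange_one_cons (by omega)]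
      unfold bLoop3
      rw [if_neg (by
        have := hno 0 (by push_cast; omega)
        simpa using this)]
      refine ih (s + 1) t (by omega) factor a (p3 * 3) ?_
      intro j hj
      have := hno (j + 1) (by push_cast; omega)
      intro hc
      apply this
      rw [← hc]; ring

-- B's inner loop finds the first match
lemma bLoop3_some : ∀ (n : Nat) (s t : Int), t - s ≤ n → ∀ (factor a p3 : Int) (j : Nat),
    (j : Int) < t - s → p3 * 3^j = factor → (∀ i : Nat, i < j → p3 * 3^i ≠ factor) →
    bLoop3 factor a (PySem.List.pyRange s t 1) p3 = some (a + s + j) := by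
  intro n
  induction n with
  | zero => intro s t ht factor a p3 j hj _ _; omega
  | succ k ih =>
    intro s t ht factor a p3 j hj heq hmin
    rw [PySem.List.pyRange_one_cons (by omega)]
    unfold bLoop3
    cases j with
    | zero =>
      rw [if_pos (by simpa using heq)]
      norm_num
    | succ j' =>
      rw [if_neg (by
        have := hmin 0 (by omega)
        simpa using this)]
      have hrec := ih (s + 1) t (by omega) factor a (p3 * 3) j'
        (by omega)
        (by rw [← heq]; ring)
        (by
          intro i hi hc
          apply hmin (i + 1) (by omega)
          rw [← hc]; ring)
      rw [hrec]
      simp only [Option.some.injEq]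
      push_cast
      omega

-- B's outer loop finds nothing
lemma bLoop2_none : ∀ (n : Nat) (s t : Int), t - s ≤ n → ∀ (factor p2 : Int),
    (∀ i j : Nat, (i : Int) < t - s → j < 41 → p2 * 2^i * 3^j ≠ factor) →
    bLoop2 factor (PySem.List.pyRange s t 1) p2 = none := by
  intro n
  induction n with
  | zero =>
    intro s t ht factor p2 _
    rw [PySem.List.pyRange_one_eq_nil (by omega)]
    rfl
  | succ k ih =>
    intro s t ht factor p2 hno
    by_cases hst : t ≤ s
    · rw [PySem.List.pyRange_one_eq_nil hst]; rfl
    · rw [PySem.List.pyRange_one_cons (by omega)]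
      unfold bLoop2
      rw [bLoop3_none 41 0 41 (by omega) factor s p2 (by
        intro j hj hc
        exact hno 0 j (by push_cast; omega) (by omega) (by rw [← hc]; ring))]
      refine ih (s + 1) t (by omega) factor (p2 * 2) ?_
      intro i j hi hj hc
      apply hno (i + 1) j (by push_cast; omega) hj
      rw [← hc]; ring

-- B's outer loop finds the unique exponent pair
lemma bLoop2_some : ∀ (n : Nat) (s t : Int), t - s ≤ n → ∀ (factor p2 : Int) (A B : Nat),
    (A : Int) < t - s → B < 41 → p2 * 2^A * 3^B = factor →
    (∀ i j : Nat, i < A → j < 41 → p2 * 2^i * 3^j ≠ factor) →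
    (∀ j : Nat, j < B → p2 * 2^A * 3^j ≠ factor) →
    bLoop2 factor (PySem.List.pyRange s t 1) p2 = some (s + A + B) := by
  intro n
  induction n with
  | zero => intro s t ht factor p2 A B hA _ _ _ _; omega
  | succ k ih =>
    intro s t ht factor p2 A B hA hB heq hlow hfst
    rw [PySem.List.pyRange_one_cons (by omega)]
    unfold bLoop2
    cases A with
    | zero =>
      rw [bLoop3_some 41 0 41 (by omega) factor s p2 B (by push_cast; omega)
        (by rw [← heq]; ring)
        (by
          intro i hi hc
          exact hfst i hi (by rw [← hc]; ring))]
      norm_num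
    | succ A' =>
      rw [bLoop3_none 41 0 41 (by omega) factor s p2 (by
        intro j hj hc
        exact hlow 0 j (by omega) (by omega) (by rw [← hc]; ring))]
      have hrec := ih (s + 1) t (by omega) factor (p2 * 2) A' B
        (by omega) hB
        (by rw [← heq]; ring)
        (by
          intro i j hi hj hc
          apply hlow (i + 1) j (by omega) hj
          rw [← hc]; ring)
        (by
          intro j hj hc
          apply hfst j hj
          rw [← hc]; ring)
      rw [hrec]
      simp only [Option.some.injEq]
      push_cast
      omega

-- ===== VERDICT =====
theorem solve_spec : Claim_equal_solve := by
  intro x y hdom hpre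
  unfold Spec_solve solve solve_alt
  by_cases hxy : x = y
  · rw [if_pos hxy, if_pos hxy]
  rw [if_neg hxy, if_neg hxy]
  rcases hpre with h | ⟨hx, hy⟩
  · exact absurd h hxy
  by_cases hmod : PySem.Int.mod y x = 0
  · rw [if_neg (not_not_intro hmod)]
    set F := PySem.Int.floordiv y x with hFdef
    have hyF : F * x = y := by
      have := PySem.Int.floordiv_mul_add_mod y x
      rw [← hFdef] at this
      omega
    have hFne : F ≠ 0 := by
      intro hcon
      rw [hcon, zero_mul] at hyF
      exact hy hyF.symm
    have hF1 : F ≠ 1 := by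
      intro hcon
      rw [hcon, one_mul] at hyF
      exact hxy hyF
    have hdvd2 : ∀ k : Int, F = 2 * k → PySem.Int.mod y 2 = 0 := by
      intro k hk
      rw [pmod2]
      have : (2:Int) ∣ y := ⟨k * x, by rw [← hyF, hk]; ring⟩
      omega
    have hdvd3 : ∀ k : Int, F = 3 * k → PySem.Int.mod y 3 = 0 := by
      intro k hk
      rw [pmod3]
      have : (3:Int) ∣ y := ⟨k * x, by rw [← hyF, hk]; ring⟩
      omega
    -- bound on |F| from the domain
    have hFbound : F.natAbs ≤ 2147483648 := by
      have hynat : y.natAbs ≤ 2147483648 := by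
        unfold Dom_solve pvDomInt at hdom
        simp only [Bool.and_eq_true, decide_eq_true_eq] at hdom
        omega
      have : F.natAbs * x.natAbs = y.natAbs := by
        rw [← Int.natAbs_mul, hyF]
      have hx1 : 1 ≤ x.natAbs := by omega
      nlinarith
    by_cases hgood : ∃ a b : Nat, F = 2^a * 3^b
    · obtain ⟨A, B, hF⟩ := hgood
      -- A + B ≥ 1, so A's y%2/y%3 guard cannot fire
      have hAB : A + B ≠ 0 := by
        intro hc
        apply hF1
        have : A = 0 ∧ B = 0 := by omega
        rw [hF, this.1, this.2]; norm_num
      have hguard : ¬ (PySem.Int.mod y 2 ≠ 0 ∧ PySem.Int.mod y 3 ≠ 0) := by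
        rintro ⟨hg2, hg3⟩
        cases A with
        | succ A' =>
          exact hg2 (hdvd2 (2^A' * 3^B) (by rw [hF]; ring))
        | zero =>
          cases B with
          | succ B' => exact hg3 (hdvd3 (2^0 * 3^B') (by rw [hF]; ring))
          | zero => omega
      rw [if_neg (by
        intro hc
        rcases hc with hc | hc
        · exact hc hmod
        · exact hguard hc)]
      -- exponent bounds: 2^A ≤ F ≤ 2^31 → A ≤ 31; 3^B ≤ F < 3^21 → B ≤ 20
      have hFnat : F.natAbs = 2^A * 3^B := by
        have hcast : F = ((2^A * 3^B : Nat) : Int) := by rw [hF]; push_cast; ring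
        rw [hcast, Int.natAbs_natCast]
      have hA31 : A < 64 := by
        by_contra hc
        have h1 : (2:Nat)^64 ≤ 2^A := Nat.pow_le_pow_right (by norm_num) (by omega)
        have h2 : (2:Nat)^A ≤ 2^A * 3^B := Nat.le_mul_of_pos_right _ (by positivity)
        have h3 : (2:Nat)^64 = 18446744073709551616 := by norm_num
        omega
      have hB41 : B < 41 := by
        by_contra hc
        have h1 : (3:Nat)^41 ≤ 3^B := Nat.pow_le_pow_right (by norm_num) (by omega)
        have h2 : (3:Nat)^B ≤ 2^A * 3^B := Nat.le_mul_of_pos_left _ (by positivity)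
        have h3 : (3:Nat)^41 = 36472996377170786403 := by norm_num
        omega
      have hB2 : bLoop2 F (PySem.List.pyRange 0 64 1) 1 = some (0 + (A:Int) + B) := by
        refine bLoop2_some 64 0 64 (by omega) F 1 A B (by push_cast; omega) hB41
          (by rw [hF]; ring)
          (by
            intro i j hi _ hc
            have h' : (2:Int)^i * 3^j = 2^A * 3^B := by rw [← hF, ← hc]; ring
            have := pow23_inj i j A B h'
            omega)
          (by
            intro j hj hc
            have h' : (2:Int)^A * 3^j = 2^A * 3^B := by rw [← hF, ← hc]; ring
            have := pow23_inj A j A B h'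
            omega)
      have hAval : solveLoopF (F.natAbs + 1) F 0 = 0 + (A:Int) + B := by
        rw [hF]
        exact A_good _ A B 0 (by omega)
      rw [hAval, hB2]
    · push Not at hgood
      have hBnone : bLoop2 F (PySem.List.pyRange 0 64 1) 1 = none := by
        refine bLoop2_none 64 0 64 (by omega) F 1 ?_
        intro i j _ _ hc
        exact hgood i j (by rw [← hc]; ring)
      rw [hBnone]
      by_cases hguard : PySem.Int.mod y 2 ≠ 0 ∧ PySem.Int.mod y 3 ≠ 0
      · rw [if_pos (Or.inr hguard)]
      · rw [if_neg (by
          intro hc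
          rcases hc with hc | hc
          · exact hc hmod
          · exact hguard hc)]
        exact A_bad (F.natAbs + 1) F 0 hFne (by omega) (fun a b hc => hgood a b hc)
  · rw [if_pos (Or.inl hmod), if_pos hmod]
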